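-- pv_equiv track=rewrite | github.com/AB-Law/Pluck-It | PluckIt.Processor/agents/stylist_agent.py | _extract_follow_up_refinement
-- ===== SOURCE A (Python) =====
-- _AFFIRMATIVES = frozenset([
--     "yes", "yeah", "yep", "yup", "sure", "ok", "okay", "please", "go ahead", "go on",
--     "do it", "show me", "yes please", "sounds good", "sounds great", "absolutely",
--     "definitely", "of course", "why not", "let's do it", "let's go",
-- ])
--
-- def _extract_follow_up_refinement(user_message: str) -> str:
--     normalised = (user_message or "").strip().lower().rstrip("?.!")
--     if not normalised:
--         return ""
--     for phrase in sorted(_AFFIRMATIVES, key=len, reverse=True):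
--         if not normalised.startswith(phrase):
--             continue
--         if normalised == phrase:
--             return ""
--         return normalised[len(phrase):].lstrip(" ,")
--     return normalised
-- ===== SOURCE B (Python) =====
-- _AFFIRMATIVES = frozenset([
--     "yes", "yeah", "yep", "yup", "sure", "ok", "okay", "please", "go ahead", "go on",
--     "do it", "show me", "yes please", "sounds good", "sounds great", "absolutely",
--     "definitely", "of course", "why not", "let's do it", "let's go",
-- ])
--
-- _MAX_AFFIRMATIVE_LEN = 12  # len("sounds great")
--
-- def _extract_follow_up_refinement(user_message: str) -> str:
--     normalised = (user_message or "").strip().lower().rstrip("?.!")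
--     if not normalised:
--         return ""
--     # Longest-prefix match by hashed lookup over candidate prefix lengths,
--     # longest first, instead of scanning the sorted phrase list.
--     for length in range(min(len(normalised), _MAX_AFFIRMATIVE_LEN), 0, -1):
--         if normalised[:length] in _AFFIRMATIVES:
--             if length == len(normalised):
--                 return ""
--             return normalised[length:].lstrip(" ,")
--     return normalised
-- ===== Notes on version B (the rewrite author's own statement) =====
-- stated objective: alternative
-- what changed: Replaces A's sort of the affirmative set plus linear scan for the first matching prefix by a longest-first loop over candidate prefix lengths with a hashed set lookup per length, so the phrase list is never sorted or scanned.
import Mathlib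
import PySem

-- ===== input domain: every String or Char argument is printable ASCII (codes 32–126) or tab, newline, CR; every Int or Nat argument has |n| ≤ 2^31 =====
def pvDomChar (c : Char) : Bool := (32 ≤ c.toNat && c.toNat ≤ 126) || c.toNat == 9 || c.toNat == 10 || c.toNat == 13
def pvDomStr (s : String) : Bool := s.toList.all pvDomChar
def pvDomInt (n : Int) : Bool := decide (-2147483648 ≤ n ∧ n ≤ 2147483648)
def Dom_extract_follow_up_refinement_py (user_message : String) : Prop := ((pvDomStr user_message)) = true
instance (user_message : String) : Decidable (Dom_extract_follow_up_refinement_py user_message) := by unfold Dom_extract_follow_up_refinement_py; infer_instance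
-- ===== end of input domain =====

-- B replaces A's sort-then-scan over the affirmative phrases by a longest-first loop
-- over candidate prefix LENGTHS with a set lookup per length (objective: alternative).

-- ===== PORT A =====
-- the _AFFIRMATIVES literal, in source order (as lists of code points)
def pvAffirmatives : List (List Char) :=
  ["yes".toList, "yeah".toList, "yep".toList, "yup".toList, "sure".toList, "ok".toList,
   "okay".toList, "please".toList, "go ahead".toList, "go on".toList, "do it".toList,
   "show me".toList, "yes please".toList, "sounds good".toList, "sounds great".toList,
   "absolutely".toList, "definitely".toList, "of course".toList, "why not".toList,
   "let's do it".toList, "let's go".toList]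

-- s.rstrip(chars): drop trailing characters that occur in `chars` (ported by hand, exact)
def pvRstripAny (cs : List Char) (chars : List Char) : List Char :=
  ((cs.reverse.dropWhile (fun c => chars.contains c)).reverse)

-- s.lstrip(chars): drop leading characters that occur in `chars` (ported by hand, exact)
def pvLstripAny (cs : List Char) (chars : List Char) : List Char :=
  cs.dropWhile (fun c => chars.contains c)

-- (user_message or "").strip().lower().rstrip("?.!")  — identical source line in A and in B
def pvNormalise (user_message : String) : List Char :=
  pvRstripAny (PySem.Chars.lower (PySem.Chars.strip user_message.toList)) ['?', '.', '!']

-- A's for-loop over the sorted phrases (continue / return "" / return tail / fall through)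
def pvScanA (t : List Char) : List (List Char) → List Char
  | [] => t
  | p :: rest =>
    if !(PySem.Chars.startswith t p) then pvScanA t rest
    else if t = p then []
    else pvLstripAny (PySem.List.slice t (some (p.length : Int)) none) [' ', ',']

def extract_follow_up_refinement_py (user_message : String) : String :=
  let normalised := pvNormalise user_message
  if normalised = [] then ""
  else String.ofList (pvScanA normalised (PySem.List.sorted pvAffirmatives (fun p => p.length) true))

-- ===== PORT B =====
def pvAffirmativeSet : PySem.Set (List Char) := PySem.Set.ofList pvAffirmatives

-- B's for-loop over candidate prefix lengths (longest first), set lookup per length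
def pvScanB (t : List Char) : List Int → List Char
  | [] => t
  | L :: rest =>
    if PySem.Set.contains pvAffirmativeSet (PySem.List.slice t none (some L)) then
      (if L = (t.length : Int) then []
       else pvLstripAny (PySem.List.slice t (some L) none) [' ', ','])
    else pvScanB t rest

def extract_follow_up_refinement_py_alt (user_message : String) : String :=
  let normalised := pvNormalise user_message
  if normalised = [] then ""
  else String.ofList
    (pvScanB normalised (PySem.List.pyRange (min (normalised.length : Int) 12) 0 (-1)))

-- ===== PRECONDITION & SPEC =====
def Spec_extract_follow_up_refinement_py (user_message : String) (out : String) : Prop := out = extract_follow_up_refinement_py_alt user_message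
instance (user_message : String) (out : String) : Decidable (Spec_extract_follow_up_refinement_py user_message out) := by unfold Spec_extract_follow_up_refinement_py; infer_instance

-- ===== CLAIM (what is proved, stated in full; the proofs are below) =====
def Claim_equal_extract_follow_up_refinement_py : Prop := ∀ (user_message : String), Dom_extract_follow_up_refinement_py user_message → Spec_extract_follow_up_refinement_py user_message (extract_follow_up_refinement_py user_message)

-- ===== LEMMAS AND PROOFS =====

-- the phrases of a given length, and their concatenation longest-first
def pvG (L : Nat) : List (List Char) := pvAffirmatives.filter (fun p => p.length == L)

def pvGroups : Nat → List (List Char)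
  | 0 => []
  | L + 1 => pvG (L + 1) ++ pvGroups L

lemma pvSorted_eq_groups :
    PySem.List.sorted pvAffirmatives (fun p => p.length) true = pvGroups 12 := by decide

-- the common reference: try prefix lengths L, L-1, …, 1
def pvRef (t : List Char) : Nat → List Char
  | 0 => t
  | L + 1 =>
    if (L + 1) ≤ t.length ∧ t.take (L + 1) ∈ pvG (L + 1) then
      (if (L + 1) = t.length then [] else pvLstripAny (t.drop (L + 1)) [' ', ','])
    else pvRef t L

lemma pvStartswith_false_of_long {t p : List Char} (h : t.length < p.length) :
    PySem.Chars.startswith t p = false := by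
  rw [Bool.eq_false_iff]
  intro hc
  have := List.IsPrefix.length_le ((PySem.Chars.startswith_iff t p).mp hc)
  omega

lemma pvScanA_skip {t : List Char} {G rest : List (List Char)}
    (h : ∀ p ∈ G, PySem.Chars.startswith t p = false) :
    pvScanA t (G ++ rest) = pvScanA t rest := by
  induction G with
  | nil => rfl
  | cons p G ih =>
    simp only [List.cons_append, pvScanA, h p (by simp)]
    exact ih (fun q hq => h q (by simp [hq]))

lemma pvScanA_group {t : List Char} {L : Nat} (_hL : L ≤ t.length)
    {G rest : List (List Char)} (hlen : ∀ p ∈ G, p.length = L) :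
    pvScanA t (G ++ rest) =
      if t.take L ∈ G then
        (if L = t.length then [] else pvLstripAny (t.drop L) [' ', ','])
      else pvScanA t rest := by
  induction G with
  | nil => simp
  | cons p G ih =>
    have hpl : p.length = L := hlen p (by simp)
    by_cases hs : PySem.Chars.startswith t p = true
    · have hp : p = t.take L := by
        have := (PySem.Chars.startswith_iff t p).mp hs
        rw [List.prefix_iff_eq_take] at this
        rw [this, hpl]
      have hmem : t.take L ∈ p :: G := by rw [hp]; exact List.mem_cons_self
      simp only [List.cons_append, pvScanA, hs, Bool.not_true, Bool.false_eq_true,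
        if_false, if_pos hmem]
      have heq : (t = p) ↔ (L = t.length) := by
        constructor
        · intro h; rw [h]; omega
        · intro h
          rw [hp]
          exact (List.take_of_length_le (by omega)).symm
      rw [PySem.List.slice_from t (by positivity), hpl]
      simp only [Int.toNat_natCast]
      by_cases hteq : t = p
      · rw [if_pos hteq, if_pos (heq.mp hteq)]
      · rw [if_neg hteq, if_neg (fun h => hteq (heq.mpr h))]
    · have hs' : PySem.Chars.startswith t p = false := by simpa using hs
      have hne : t.take L ≠ p := by
        intro h
        rw [Bool.eq_false_iff] at hs'
        apply hs'
        rw [PySem.Chars.startswith_iff, ← h]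
        exact List.take_prefix L t
      simp only [List.cons_append, pvScanA, hs', Bool.not_false, if_true, List.mem_cons]
      rw [ih (fun q hq => hlen q (by simp [hq]))]
      by_cases hm : t.take L ∈ G
      · rw [if_pos hm, if_pos (Or.inr hm)]
      · rw [if_neg hm, if_neg (by rintro (h | h); exact hne h; exact hm h)]

lemma pvScanA_eq_ref (t : List Char) : ∀ L : Nat, pvScanA t (pvGroups L) = pvRef t L := by
  intro L
  induction L with
  | zero => rfl
  | succ L ih =>
    by_cases hL : L + 1 ≤ t.length
    · rw [pvGroups, pvScanA_group hL
        (fun p hp => by simpa using List.of_mem_filter hp), ih, pvRef]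
      exact if_congr (by simp [hL]) rfl rfl
    · have h1 : ∀ p ∈ pvG (L + 1), PySem.Chars.startswith t p = false := fun p hp => by
        apply pvStartswith_false_of_long
        have : p.length = L + 1 := by simpa using List.of_mem_filter hp
        omega
      rw [pvGroups, pvScanA_skip h1, ih, pvRef, if_neg (fun h => hL h.1)]

-- descending range:  range(m, 0, -1) = [m, m-1, …, 1]
lemma pvPyRange_down (m : Nat) :
    PySem.List.pyRange (m : Int) 0 (-1)
      = (List.range m).map (fun (k : Nat) => (m : Int) - (k : Int)) := by
  simp only [PySem.List.pyRange]
  rcases Nat.eq_zero_or_pos m with h | h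
  · subst h; simp
  · rw [if_neg (by norm_num), if_neg (by norm_num), if_pos (by exact_mod_cast h)]
    have h1 : (((m : Int) - 0 + - -1 - 1) / - -1).toNat = m := by norm_num
    rw [h1]
    exact List.map_congr_left (fun k _ => by ring_nf)

lemma pvPyRange_down_succ (m : Nat) :
    PySem.List.pyRange ((m + 1 : Nat) : Int) 0 (-1)
      = ((m + 1 : Nat) : Int) :: PySem.List.pyRange ((m : Nat) : Int) 0 (-1) := by
  rw [pvPyRange_down, pvPyRange_down, List.range_succ_eq_map]
  simp only [List.map_cons, List.map_map, Nat.cast_zero, sub_zero]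
  congr 1
  exact List.map_congr_left (fun k _ => by simp [Function.comp, Nat.succ_eq_add_one])

lemma pvContains_take {t : List Char} {L : Nat} (hL : L ≤ t.length) :
    (PySem.Set.contains pvAffirmativeSet (t.take L) = true) ↔ t.take L ∈ pvG L := by
  have hset : pvAffirmativeSet = pvAffirmatives := by decide
  have hlen : (t.take L).length = L := by rw [List.length_take]; omega
  rw [hset]
  simp [PySem.Set.contains, pvG, List.mem_filter, hlen]

lemma pvScanB_eq_ref_aux (t : List Char) :
    ∀ L : Nat, L ≤ t.length → pvScanB t (PySem.List.pyRange (L : Int) 0 (-1)) = pvRef t L := by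
  intro L
  induction L with
  | zero => intro _; rfl
  | succ L ih =>
    intro hL
    rw [pvPyRange_down_succ, pvScanB,
      PySem.List.slice_to t (b := ((L + 1 : Nat) : Int)) (by positivity),
      PySem.List.slice_from t (a := ((L + 1 : Nat) : Int)) (by positivity)]
    simp only [Int.toNat_natCast]
    rw [pvRef]
    by_cases hm : PySem.Set.contains pvAffirmativeSet (t.take (L + 1)) = true
    · rw [if_pos hm, if_pos (And.intro hL ((pvContains_take hL).mp hm))]
      exact if_congr (by constructor <;> intro h <;> exact_mod_cast h) rfl rfl
    · rw [if_neg (by simpa using hm), if_neg (fun h => hm ((pvContains_take hL).mpr h.2)),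
        ih (by omega)]

lemma pvRef_high (t : List Char) : ∀ L : Nat, t.length ≤ L → pvRef t L = pvRef t t.length := by
  intro L
  induction L with
  | zero => intro h; rw [Nat.le_zero.mp h]
  | succ L ih =>
    intro h
    rcases Nat.lt_or_ge t.length (L + 1) with hlt | hge
    · rw [pvRef, if_neg (fun hc => absurd hc.1 (by omega))]
      exact ih (by omega)
    · have : t.length = L + 1 := by omega
      rw [this]

lemma pvScan_main (t : List Char) :
    pvScanA t (PySem.List.sorted pvAffirmatives (fun p => p.length) true)
      = pvScanB t (PySem.List.pyRange (min (t.length : Int) 12) 0 (-1)) := by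
  rw [pvSorted_eq_groups, pvScanA_eq_ref]
  rcases Nat.lt_or_ge t.length 12 with hlt | hge
  · have hmin : min ((t.length : Nat) : Int) 12 = ((t.length : Nat) : Int) :=
      min_eq_left (by exact_mod_cast Nat.le_of_lt hlt)
    rw [hmin, pvScanB_eq_ref_aux t t.length le_rfl, pvRef_high t 12 (by omega)]
  · have hmin : min ((t.length : Nat) : Int) 12 = ((12 : Nat) : Int) := by
      rw [min_eq_right (by exact_mod_cast hge)]; norm_num
    rw [hmin, pvScanB_eq_ref_aux t 12 hge]

-- ===== VERDICT (by name: the statement is the Claim_ definition above) =====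
theorem extract_follow_up_refinement_py_spec : Claim_equal_extract_follow_up_refinement_py := by
  intro um _
  unfold Spec_extract_follow_up_refinement_py extract_follow_up_refinement_py
    extract_follow_up_refinement_py_alt
  simp only [pvScan_main]
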